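-- pv_equiv track=rewrite | github.com/tosobolewski/comp_prog_zut | 1. podstawy programowania/SP_PK_lista 7 premiowa/spirala3.py | spirala
-- ===== SOURCE A (Python) =====
-- def spirala(we):
--     if we % 2 == 0:
--         return None
--     n = 1
--     while n <= we:
--         if n == 1:
--             wynik = 1
--         else:
--             wynik = wynik + 4 * (n - 2)
--         n += 2
--     return wynik
-- ===== SOURCE B (Python) =====
-- def spirala(we):
--     # Closed form: the loop's result for odd we >= 1 is 1 + (we-1)^2.
--     if we % 2 == 0:
--         return None
--     return 1 + (we - 1) ** 2
-- ===== Notes on version B (the rewrite author's own statement) =====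
-- stated objective: faster
-- what changed: Replaced the accumulating while-loop over odd n with the closed form 1+(we-1)^2.
import Mathlib
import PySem

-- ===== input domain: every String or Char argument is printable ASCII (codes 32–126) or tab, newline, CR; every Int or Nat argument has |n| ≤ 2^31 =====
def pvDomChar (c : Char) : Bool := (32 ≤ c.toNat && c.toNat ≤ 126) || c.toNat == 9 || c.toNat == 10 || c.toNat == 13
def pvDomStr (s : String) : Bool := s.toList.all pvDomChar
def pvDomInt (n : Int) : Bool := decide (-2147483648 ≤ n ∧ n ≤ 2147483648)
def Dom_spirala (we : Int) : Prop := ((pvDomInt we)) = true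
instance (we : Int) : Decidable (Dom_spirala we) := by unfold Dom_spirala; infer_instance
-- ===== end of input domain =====

-- B replaces A's accumulating loop over odd n with the closed form 1+(we-1)^2 (O(1) vs O(we)).

-- ===== PORT A =====
-- the while-loop: carries (n, wynik); 'wynik' is unbound in Python until the first
-- iteration runs — we seed 0, which is only returned on inputs excluded by Pre_
def spiralaLoop (we n wynik : Int) : Int :=
  if n ≤ we then
    spiralaLoop we (n + 2) (if n = 1 then 1 else wynik + 4 * (n - 2))
  else wynik
termination_by (we + 2 - n).toNat
decreasing_by omega

def spirala (we : Int) : Option Int :=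
  if PySem.Int.mod we 2 = 0 then none
  else some (spiralaLoop we 1 0)

-- ===== PORT B =====
def spirala_alt (we : Int) : Option Int :=
  if PySem.Int.mod we 2 = 0 then none
  else some (1 + (we - 1) ^ 2)

-- ===== PRECONDITION & SPEC =====
-- Pre_ excludes odd we < 1, on which the Python A raises UnboundLocalError
def Pre_spirala (we : Int) : Prop := we % 2 = 0 ∨ 1 ≤ we
instance (we : Int) : Decidable (Pre_spirala we) := by unfold Pre_spirala; infer_instance
def pvWitness_spirala : Int := (5)

def Spec_spirala (we : Int) (out : Option Int) : Prop := out = spirala_alt we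
instance (we : Int) (out : Option Int) : Decidable (Spec_spirala we out) := by unfold Spec_spirala; infer_instance

-- ===== CLAIM (what is proved, stated in full; the proofs are below) =====
def Claim_equal_spirala : Prop := ∀ (we : Int), Dom_spirala we → Pre_spirala we → Spec_spirala we (spirala we)

-- ===== LEMMAS AND PROOFS =====
-- invariant: entering the loop at odd n ≥ 3 with accumulator 1+(n-3)^2 yields 1+(we-1)^2
lemma spiralaLoop_inv (m : Nat) : ∀ (we n : Int), we % 2 = 1 → n % 2 = 1 → 3 ≤ n → n ≤ we + 2 →
    (we + 2 - n).toNat = m → spiralaLoop we n (1 + (n - 3) ^ 2) = 1 + (we - 1) ^ 2 := by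
  induction m using Nat.strong_induction_on with
  | _ m ih =>
    intro we n hwe hn h3 hle hm
    rw [spiralaLoop]
    by_cases h : n ≤ we
    · have hne : n ≠ 1 := by omega
      simp only [hne, if_false, if_pos h]
      have harith : 1 + (n - 3) ^ 2 + 4 * (n - 2) = 1 + ((n + 2) - 3) ^ 2 := by ring
      rw [harith]
      exact ih (we + 2 - (n + 2)).toNat (by omega) we (n + 2) hwe (by omega) (by omega) (by omega) rfl
    · have : n = we + 2 := by omega
      simp only [h, if_false]
      subst this; ring

lemma spiralaLoop_closed (we : Int) (hwe : we % 2 = 1) (h1 : 1 ≤ we) :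
    spiralaLoop we 1 0 = 1 + (we - 1) ^ 2 := by
  rw [spiralaLoop]
  simp only [if_pos h1]
  have : (1 : Int) = 1 + ((3 : Int) - 3) ^ 2 := by ring
  rw [this]
  exact spiralaLoop_inv (we + 2 - 3).toNat we 3 hwe (by omega) (by omega) (by omega) rfl

-- ===== VERDICT (by name: the statement is the Claim_ definition above) =====
theorem spirala_spec : Claim_equal_spirala := by
  intro we _ hpre
  unfold Spec_spirala spirala spirala_alt
  rw [PySem.Int.mod_eq_emod_of_pos (a := we) (b := 2) (by norm_num)]
  by_cases h : we % 2 = 0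
  · simp [h]
  · have hwe : we % 2 = 1 := by omega
    have h1 : 1 ≤ we := by unfold Pre_spirala at hpre; omega
    simp [h, spiralaLoop_closed we hwe h1]
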